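-- pv_equiv track=rewrite | github.com/colludenny-bit/antigravity-site | backend/deep_research_30.py | _infer_pattern_bias
-- ===== SOURCE A (Python) =====
-- def _infer_pattern_bias(pattern: str) -> str:
--     text = str(pattern or "").upper()
--     bull = sum(token in text for token in ("BULL", "RISK_ON", "UP", "LONG", "DOVISH", "LOW_RISK"))
--     bear = sum(token in text for token in ("BEAR", "RISK_OFF", "DOWN", "SHORT", "HAWKISH", "HIGH_RISK"))
--     if bull > bear:
--         return "BULLISH"
--     if bear > bull:
--         return "BEARISH"
--     return "NEUTRAL"
-- ===== SOURCE B (Python) =====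
-- _BULL_TOKENS = ("BULL", "RISK_ON", "UP", "LONG", "DOVISH", "LOW_RISK")
-- _BEAR_TOKENS = ("BEAR", "RISK_OFF", "DOWN", "SHORT", "HAWKISH", "HIGH_RISK")
--
--
-- def _infer_pattern_bias(pattern: str) -> str:
--     # Text-driven single sweep: walk the text once and, at each position, record
--     # every keyword that starts there; classify by set-intersection sizes.
--     text = str(pattern or "").upper()
--     seen = set()
--     for i in range(len(text)):
--         for token in _BULL_TOKENS + _BEAR_TOKENS:
--             if text.startswith(token, i):
--                 seen.add(token)
--     bull = len(seen.intersection(_BULL_TOKENS))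
--     bear = len(seen.intersection(_BEAR_TOKENS))
--     if bull != bear:
--         return "BULLISH" if bull > bear else "BEARISH"
--     return "NEUTRAL"
-- ===== Notes on version B (the rewrite author's own statement) =====
-- stated objective: alternative
-- what changed: Replaces A's twelve independent substring-membership searches and two boolean-sum comprehensions with one text-driven sweep: a single pass over the positions of the uppercased text collects into a set every keyword that starts there (via startswith), and the bias is read off the sizes of that set's intersections with the bull and bear keyword sets.
import Mathlib
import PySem

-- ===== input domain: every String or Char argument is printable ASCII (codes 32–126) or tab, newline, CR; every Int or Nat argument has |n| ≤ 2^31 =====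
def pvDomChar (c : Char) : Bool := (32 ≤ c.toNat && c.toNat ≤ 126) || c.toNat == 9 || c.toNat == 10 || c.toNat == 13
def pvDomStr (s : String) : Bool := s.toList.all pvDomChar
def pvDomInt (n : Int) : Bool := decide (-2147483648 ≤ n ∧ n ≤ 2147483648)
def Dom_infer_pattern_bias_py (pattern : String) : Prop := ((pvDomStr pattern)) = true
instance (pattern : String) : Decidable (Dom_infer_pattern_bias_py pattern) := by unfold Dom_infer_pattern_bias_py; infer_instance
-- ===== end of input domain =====

-- B replaces A's twelve independent substring searches by one text-driven sweep: a single pass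
-- over the positions of the text collecting, via startswith, the set of keywords that occur;
-- objective: alternative traversal (same asymptotic cost).

-- ===== PORT A =====
def infer_pattern_bias_py (pattern : String) : String :=
  -- text = str(pattern or "").upper()   (pattern or "" is pattern unless empty, then "")
  let text := PySem.Str.upper (if pattern == "" then "" else pattern)
  let bull := (["BULL", "RISK_ON", "UP", "LONG", "DOVISH", "LOW_RISK"].map
      (fun token => if PySem.Str.isIn token text then (1 : Int) else 0)).sum
  let bear : Int := (["BEAR", "RISK_OFF", "DOWN", "SHORT", "HAWKISH", "HIGH_RISK"].map
      (fun token => if PySem.Str.isIn token text then (1 : Int) else 0)).sum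
  if bull > bear then "BULLISH"
  else if bear > bull then "BEARISH"
  else "NEUTRAL"

-- ===== PORT B =====
def pvBullTokens : List String := ["BULL", "RISK_ON", "UP", "LONG", "DOVISH", "LOW_RISK"]
def pvBearTokens : List String := ["BEAR", "RISK_OFF", "DOWN", "SHORT", "HAWKISH", "HIGH_RISK"]

-- text.startswith(token, i): exact for the 0 ≤ i < len(text) produced by the range below
def pvInner (cs : List Char) (i : Int) (seen : PySem.Set String) : PySem.Set String :=
  (pvBullTokens ++ pvBearTokens).foldl
    (fun s token =>
      if PySem.Chars.startswith (cs.drop i.toNat) token.toList then PySem.Set.add s token else s)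
    seen

-- the 'for i in range(len(text)): for token in …' loop building 'seen'
def pvSeen (text : String) : PySem.Set String :=
  (PySem.List.pyRange 0 (PySem.Str.len text) 1).foldl
    (fun seen i => pvInner text.toList i seen) PySem.Set.empty

def infer_pattern_bias_py_alt (pattern : String) : String :=
  let text := PySem.Str.upper (if pattern == "" then "" else pattern)
  let seen := pvSeen text
  let bull := PySem.Set.len (PySem.Set.inter seen pvBullTokens)
  let bear := PySem.Set.len (PySem.Set.inter seen pvBearTokens)
  if bull ≠ bear then (if bull > bear then "BULLISH" else "BEARISH")
  else "NEUTRAL"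

-- ===== PRECONDITION & SPEC =====
def Spec_infer_pattern_bias_py (pattern : String) (out : String) : Prop := out = infer_pattern_bias_py_alt pattern
instance (pattern : String) (out : String) : Decidable (Spec_infer_pattern_bias_py pattern out) := by unfold Spec_infer_pattern_bias_py; infer_instance

-- ===== CLAIM (what is proved, stated in full; the proofs are below) =====
def Claim_equal_infer_pattern_bias_py : Prop := ∀ (pattern : String), Dom_infer_pattern_bias_py pattern → Spec_infer_pattern_bias_py pattern (infer_pattern_bias_py pattern)

-- ===== LEMMAS AND PROOFS =====

-- membership after the inner token loop at one position
theorem pv_mem_inner (cs : List Char) (i : Int) (seen : PySem.Set String) (t : String) :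
    t ∈ pvInner cs i seen ↔
      t ∈ seen ∨ (t ∈ pvBullTokens ++ pvBearTokens ∧
        PySem.Chars.startswith (cs.drop i.toNat) t.toList = true) := by
  unfold pvInner
  generalize pvBullTokens ++ pvBearTokens = toks
  induction toks generalizing seen with
  | nil => simp
  | cons x xs ih =>
    simp only [List.foldl_cons, ih, List.mem_cons]
    split
    · rename_i hx
      simp only [PySem.Set.mem_add]
      constructor
      · rintro ((h | rfl) | h)
        · exact Or.inl h
        · exact Or.inr ⟨Or.inl rfl, hx⟩
        · exact Or.inr ⟨Or.inr h.1, h.2⟩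
      · rintro (h | ⟨(rfl | hm), hs⟩)
        · exact Or.inl (Or.inl h)
        · exact Or.inl (Or.inr rfl)
        · exact Or.inr ⟨hm, hs⟩
    · rename_i hx
      constructor
      · rintro (h | h)
        · exact Or.inl h
        · exact Or.inr ⟨Or.inr h.1, h.2⟩
      · rintro (h | ⟨(rfl | hm), hs⟩)
        · exact Or.inl h
        · exact (hx hs).elim
        · exact Or.inr ⟨hm, hs⟩

-- membership after the outer position loop
theorem pv_mem_outer (cs : List Char) (is : List Int) (seen : PySem.Set String) (t : String) :
    t ∈ is.foldl (fun s i => pvInner cs i s) seen ↔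
      t ∈ seen ∨ ∃ i ∈ is, t ∈ pvBullTokens ++ pvBearTokens ∧
        PySem.Chars.startswith (cs.drop i.toNat) t.toList = true := by
  induction is generalizing seen with
  | nil => simp
  | cons x xs ih =>
    simp only [List.foldl_cons, ih, pv_mem_inner, List.mem_cons]
    constructor
    · rintro ((h | h) | ⟨i, hi, h⟩)
      · exact Or.inl h
      · exact Or.inr ⟨x, Or.inl rfl, h⟩
      · exact Or.inr ⟨i, Or.inr hi, h⟩
    · rintro (h | ⟨i, (rfl | hi), h⟩)
      · exact Or.inl (Or.inl h)
      · exact Or.inl (Or.inr h)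
      · exact Or.inr ⟨i, hi, h⟩

-- a nonempty keyword is collected by the sweep exactly when it is a substring of the text
theorem pv_seen_iff (text : String) (t : String)
    (ht : t.toList ≠ []) (hmem : t ∈ pvBullTokens ++ pvBearTokens) :
    (t ∈ pvSeen text) ↔ PySem.Str.isIn t text = true := by
  unfold pvSeen
  rw [pv_mem_outer]
  simp only [PySem.Set.empty, List.not_mem_nil, false_or]
  rw [show PySem.Str.isIn t text = PySem.Chars.isIn t.toList text.toList from by simp,
      ← PySem.Chars.exists_prefix_drop_iff_isIn]
  constructor
  · rintro ⟨i, hi, -, hs⟩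
    exact ⟨i.toNat, (PySem.Chars.startswith_iff _ _).mp hs⟩
  · rintro ⟨j, hj⟩
    by_cases hlt : j < text.toList.length
    · refine ⟨(j : Int), ?_, hmem, (PySem.Chars.startswith_iff _ _).mpr (by simpa using hj)⟩
      rw [PySem.Str.len_eq, PySem.List.mem_pyRange_one]
      omega
    · exfalso
      rw [List.drop_eq_nil_of_le (by omega)] at hj
      exact ht (List.prefix_nil.mp hj)

-- the sweep's set stays duplicate-free
theorem pv_nodup_inner (cs : List Char) (i : Int) (seen : PySem.Set String)
    (hs : List.Nodup seen) : List.Nodup (pvInner cs i seen) := by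
  unfold pvInner
  generalize pvBullTokens ++ pvBearTokens = toks
  induction toks generalizing seen with
  | nil => simpa using hs
  | cons x xs ih =>
    simp only [List.foldl_cons]
    split
    · exact ih _ (PySem.Set.nodup_add _ _ hs)
    · exact ih _ hs

theorem pv_nodup_seen (text : String) : List.Nodup (pvSeen text) := by
  unfold pvSeen
  generalize PySem.List.pyRange 0 (PySem.Str.len text) 1 = is
  have h : ∀ (is : List Int) (s : PySem.Set String), List.Nodup s →
      List.Nodup (is.foldl (fun s i => pvInner text.toList i s) s) := by
    intro is
    induction is with
    | nil => intro s hs; simpa using hs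
    | cons x xs ih => intro s hs; exact ih _ (pv_nodup_inner _ _ _ hs)
  exact h is PySem.Set.empty (by simp [PySem.Set.empty])

-- |s ∩ bl| counted from bl's side, for a duplicate-free bl
theorem pv_len_inter (s : PySem.Set String) (bl : List String)
    (hs : List.Nodup s) (hbl : bl.Nodup) :
    PySem.Set.len (PySem.Set.inter s bl) = (bl.countP (fun t => decide (t ∈ s)) : Int) := by
  unfold PySem.Set.len
  congr 1
  have h1 : (PySem.Set.inter s bl).Perm (bl.filter (fun t => decide (t ∈ s))) := by
    rw [List.perm_ext_iff_of_nodup (PySem.Set.nodup_inter s bl hs) (hbl.filter _)]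
    intro a
    simp only [PySem.Set.mem_inter, List.mem_filter, decide_eq_true_eq]
    tauto
  rw [h1.length_eq, ← List.countP_eq_length_filter]

-- ===== VERDICT (by name: the statement is the Claim_ definition above) =====
set_option maxHeartbeats 1000000 in
theorem infer_pattern_bias_py_spec : Claim_equal_infer_pattern_bias_py := by
  intro pattern _
  simp only [Spec_infer_pattern_bias_py, infer_pattern_bias_py, infer_pattern_bias_py_alt]
  set text := PySem.Str.upper (if pattern == "" then "" else pattern) with htext
  have hne : ∀ t ∈ pvBullTokens ++ pvBearTokens, t.toList ≠ [] := by decide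
  have hcb : List.countP (fun t => PySem.Str.isIn t text) pvBullTokens
      = List.countP (fun t => decide (t ∈ pvSeen text)) pvBullTokens :=
    List.countP_congr (fun t htm => by
      simpa using (pv_seen_iff text t (hne t (List.mem_append_left _ htm))
        (List.mem_append_left _ htm)).symm)
  have hcr : List.countP (fun t => PySem.Str.isIn t text) pvBearTokens
      = List.countP (fun t => decide (t ∈ pvSeen text)) pvBearTokens :=
    List.countP_congr (fun t htm => by
      simpa using (pv_seen_iff text t (hne t (List.mem_append_right _ htm))
        (List.mem_append_right _ htm)).symm)
  have hbull : (((["BULL", "RISK_ON", "UP", "LONG", "DOVISH", "LOW_RISK"] : List String).map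
        (fun token => if PySem.Str.isIn token text then (1 : Int) else 0)).sum)
      = PySem.Set.len (PySem.Set.inter (pvSeen text) pvBullTokens) :=
    (PySem.List.sum_map_ite_one_zero _ _).trans ((congrArg Nat.cast hcb).trans
      (pv_len_inter (pvSeen text) pvBullTokens (pv_nodup_seen text) (by decide)).symm)
  have hbear : (((["BEAR", "RISK_OFF", "DOWN", "SHORT", "HAWKISH", "HIGH_RISK"] : List String).map
        (fun token => if PySem.Str.isIn token text then (1 : Int) else 0)).sum)
      = PySem.Set.len (PySem.Set.inter (pvSeen text) pvBearTokens) :=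
    (PySem.List.sum_map_ite_one_zero _ _).trans ((congrArg Nat.cast hcr).trans
      (pv_len_inter (pvSeen text) pvBearTokens (pv_nodup_seen text) (by decide)).symm)
  simp only [hbull, hbear]
  generalize PySem.Set.len (PySem.Set.inter (pvSeen text) pvBullTokens) = nb
  generalize PySem.Set.len (PySem.Set.inter (pvSeen text) pvBearTokens) = nr
  split_ifs <;> first | rfl | omega
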